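-- pv_equiv track=rewrite | github.com/SYLee1996/KOSTAT-KSIC | INDUSTRY_CODE_UTILS.py | label_mask
-- ===== SOURCE A (Python) =====
-- def label_mask(label_dictionary):
--
--     encoding = []
--     for codes in label_dictionary.values():
--         encoding.extend(codes)
--     encoding = sorted(list(set(encoding)))
--
--     decoding = {}
--     for k, v in enumerate(encoding):
--         decoding[k] = v
--
--     mask = {}
--     for k, values in label_dictionary.items():
--         mask[k] = [True] * len(encoding)
--         for v in values:
--             mask[k][encoding.index(v)] = False
--
--     return mask
-- ===== SOURCE B (Python) =====
-- def label_mask(label_dictionary):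
--     encoding = sorted({c for codes in label_dictionary.values() for c in codes})
--     return {k: [c not in set(values) for c in encoding]
--             for k, values in label_dictionary.items()}
-- ===== Notes on version B (the rewrite author's own statement) =====
-- stated objective: alternative
-- what changed: The mask step iterates over the sorted encoding and tests each code for membership in a per-label value set, instead of allocating an all-true row and scatter-writing false at the linearly searched index of each value.
import Mathlib
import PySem

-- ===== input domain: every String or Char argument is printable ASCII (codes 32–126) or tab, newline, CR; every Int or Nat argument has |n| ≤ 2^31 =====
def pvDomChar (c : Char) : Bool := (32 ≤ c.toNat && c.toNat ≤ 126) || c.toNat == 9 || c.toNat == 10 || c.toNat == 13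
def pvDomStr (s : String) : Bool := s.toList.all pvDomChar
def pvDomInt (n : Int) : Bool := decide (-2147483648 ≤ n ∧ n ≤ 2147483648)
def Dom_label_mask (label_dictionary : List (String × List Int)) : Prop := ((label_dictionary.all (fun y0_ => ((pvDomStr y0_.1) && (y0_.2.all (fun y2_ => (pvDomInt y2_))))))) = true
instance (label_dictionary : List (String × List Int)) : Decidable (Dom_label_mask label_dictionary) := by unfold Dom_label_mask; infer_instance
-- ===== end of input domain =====

-- B replaces A's scatter-writes (allocate [True]*n, set index(v) to False for each value)
-- by a direct per-position membership test against a per-label set; alternative decomposition.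

-- ===== PORT A =====
-- inner loop "for v in values: mask[k][encoding.index(v)] = False"
-- (encoding.index raises ValueError when v is absent — never reached here, case kept as a no-op branch)
def pyScatterA (enc : List Int) (m : List Bool) (vs : List Int) : List Bool :=
  vs.foldl (fun m v =>
    match PySem.List.index? enc v with
    | some i => m.set i false
    | none => m) m

-- (the Python's local 'decoding' dict is built and never used; it does not affect the result)
def label_mask (label_dictionary : List (String × List Int)) : List (String × List Bool) :=
  let d := PySem.Dict.ofList label_dictionary
  let encoding0 : List Int := d.values.foldl (fun acc codes => acc ++ codes) []
  let encoding := PySem.List.sorted (PySem.Set.ofList encoding0) (fun x => x) false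
  let mask := d.items.foldl
    (fun (mask : PySem.Dict String (List Bool)) p =>
      mask.insert p.1 (pyScatterA encoding (List.replicate encoding.length true) p.2))
    PySem.Dict.empty
  mask.items

-- ===== PORT B =====
def label_mask_alt (label_dictionary : List (String × List Int)) : List (String × List Bool) :=
  let d := PySem.Dict.ofList label_dictionary
  let encoding := PySem.List.sorted (PySem.Set.ofList d.values.flatten) (fun x => x) false
  d.items.map (fun p =>
    let valset := PySem.Set.ofList p.2
    (p.1, encoding.map (fun c => !(PySem.Set.contains valset c))))

-- ===== PRECONDITION & SPEC =====
def Spec_label_mask (label_dictionary : List (String × List Int)) (out : List (String × List Bool)) : Prop := out = label_mask_alt label_dictionary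
instance (label_dictionary : List (String × List Int)) (out : List (String × List Bool)) : Decidable (Spec_label_mask label_dictionary out) := by unfold Spec_label_mask; infer_instance

-- ===== CLAIM (what is proved, stated in full; the proofs are below) =====
def Claim_equal_label_mask : Prop := ∀ (label_dictionary : List (String × List Int)), Dom_label_mask label_dictionary → Spec_label_mask label_dictionary (label_mask label_dictionary)

-- ===== LEMMAS AND PROOFS =====

-- setting position (index? enc v) of a map over a Nodup enc rewrites exactly the entry of v
lemma set_map_index (enc : List Int) (f : Int → Bool) (v : Int) (i : Nat)
    (hnd : enc.Nodup) (hi : PySem.List.index? enc v = some i) :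
    (enc.map f).set i false = enc.map (fun c => if c = v then false else f c) := by
  obtain ⟨hk, hv, -⟩ := PySem.List.getElem_of_index?_eq_some hi
  apply List.ext_getElem
  · simp
  · intro j hj hj'
    simp only [List.length_map] at hj'
    rw [List.getElem_set, List.getElem_map, List.getElem_map]
    by_cases hji : j = i
    · subst hji
      simp [hv]
    · have : enc[j] ≠ v := by
        intro h
        exact hji (hnd.getElem_inj_iff.mp (h.trans hv.symm))
      simp [this]
      exact fun _ h => hji h.symm

-- the scatter loop over vs, started from a map over enc, is a pointwise membership test
lemma scatter_eq_map (enc : List Int) (vs : List Int) (f : Int → Bool)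
    (hnd : enc.Nodup) (hsub : ∀ v ∈ vs, v ∈ enc) :
    pyScatterA enc (enc.map f) vs = enc.map (fun c => if c ∈ vs then false else f c) := by
  induction vs generalizing f with
  | nil => simp [pyScatterA]
  | cons v vs ih =>
    have hv : v ∈ enc := hsub v (List.mem_cons_self)
    obtain ⟨i, hi⟩ := Option.isSome_iff_exists.mp ((PySem.List.index?_isSome_iff (xs := enc) (v := v)).2 hv)
    have hstep : pyScatterA enc (enc.map f) (v :: vs)
        = pyScatterA enc ((enc.map f).set i false) vs := by
      simp only [pyScatterA, List.foldl_cons, hi]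
    rw [hstep, set_map_index enc f v i hnd hi,
        ih _ (fun w hw => hsub w (List.mem_cons_of_mem _ hw))]
    apply List.map_congr_left
    intro c hc
    by_cases h1 : c = v <;> by_cases h2 : c ∈ vs <;> simp [h1, h2]

-- ===== VERDICT (by name: the statement is the Claim_ definition above) =====
theorem label_mask_spec : Claim_equal_label_mask := by
  intro l _
  unfold Spec_label_mask label_mask label_mask_alt
  simp only [PySem.List.foldl_append_eq_flatten, List.nil_append]
  set d := PySem.Dict.ofList l with hd
  set enc := PySem.List.sorted (PySem.Set.ofList d.values.flatten) (fun x => x) false with henc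
  have hnd : enc.Nodup :=
    (PySem.List.sorted_perm _ _ _).nodup_iff.mpr (PySem.Set.nodup_ofList _)
  have hfold := PySem.Dict.items_foldl_insert_fresh (l := d.items) (d := PySem.Dict.empty)
        (k := fun p : String × List Int => p.1)
        (v := fun p : String × List Int => pyScatterA enc (List.replicate enc.length true) p.2)
        (fun a _ => PySem.Dict.contains_empty _)
        (by
          have : d.items.map (fun p : String × List Int => p.1) = d.keys := rfl
          rw [this]; exact PySem.Dict.nodup_keys_ofList _)
  simp only [] at hfold
  rw [hfold, show (PySem.Dict.empty : PySem.Dict String (List Bool)).items = [] from rfl,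
      List.nil_append]
  apply List.map_congr_left
  intro p hp
  have hsub : ∀ v ∈ p.2, v ∈ enc := by
    intro v hv
    rw [henc, PySem.List.mem_sorted]
    rw [PySem.Set.mem_ofList, List.mem_flatten]
    exact ⟨p.2, List.mem_map_of_mem hp, hv⟩
  have hrep : List.replicate enc.length true = enc.map (fun _ => true) := by
    simp [List.map_const']
  rw [hrep, scatter_eq_map enc p.2 _ hnd hsub]
  refine congrArg (fun z => (p.1, z)) ?_
  apply List.map_congr_left
  intro c hc
  by_cases h : c ∈ p.2 <;>
    simp [h, PySem.Set.contains_eq_listContains, PySem.Set.mem_ofList]
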